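-- pv_equiv track=rewrite | github.com/Kali-glixh/Python | Exercises/Longest word by character extractor.py | extract_longest_words_containing
-- ===== SOURCE A (Python) =====
-- def extract_longest_words_containing(char, words):
--     """Find the text with the greatest number of characters among those given in
--     a collection, providing that a certain character is contained in that text.
--     Case sensitive
--
--     char(str): any character
--     words(list): a collection of text strings
--
--     Output(list): the collection of longest words containing char
--     """
--     result = []
--     char = char.lower()
--     max_lenght = 0
--     for word in words:
--         if char in word:
--             word_lenght = len(word)
--             if word_lenght > max_lenght:
--                 result = [word]
--                 max_lenght = word_lenght
--             elif word_lenght == max_lenght: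
--                 result.append(word)
--     return result
-- ===== SOURCE B (Python) =====
-- def extract_longest_words_containing(char, words):
--     """Longest words containing char (case-insensitive char): filter, then max, then select."""
--     char = char.lower()
--     candidates = [w for w in words if char in w]
--     if not candidates:
--         return []
--     m = max(len(w) for w in candidates)
--     return [w for w in candidates if len(w) == m]
-- ===== Notes on version B (the rewrite author's own statement) =====
-- stated objective: simpler
-- what changed: Replaces A's fused single pass mutating a running result list and max length with three plain passes: filter the candidates, take the max length, select the words of that length.
import Mathlib
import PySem

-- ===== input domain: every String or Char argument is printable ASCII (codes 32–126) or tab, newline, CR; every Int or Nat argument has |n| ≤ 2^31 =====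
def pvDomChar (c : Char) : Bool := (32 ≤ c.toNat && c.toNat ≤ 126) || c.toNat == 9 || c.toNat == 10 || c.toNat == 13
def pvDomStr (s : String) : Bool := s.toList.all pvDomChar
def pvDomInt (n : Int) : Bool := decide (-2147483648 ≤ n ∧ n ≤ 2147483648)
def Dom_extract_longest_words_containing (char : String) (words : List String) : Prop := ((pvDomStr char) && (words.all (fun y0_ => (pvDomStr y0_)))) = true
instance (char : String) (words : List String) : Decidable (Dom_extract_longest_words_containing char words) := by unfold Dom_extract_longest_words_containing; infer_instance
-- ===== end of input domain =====

-- B replaces A's fused single pass (running result list + running max length) by three plain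
-- passes: filter the candidates, take the max length, select the words of that length. Objective: simpler.

-- ===== PORT A =====
def extract_longest_words_containing (char : String) (words : List String) : List String :=
  let c := PySem.Str.lower char
  (words.foldl
    (fun (st : List String × Int) word =>
      if PySem.Str.isIn c word then
        let word_lenght : Int := PySem.Str.len word
        if word_lenght > st.2 then ([word], word_lenght)
        else if word_lenght = st.2 then (st.1 ++ [word], st.2)
        else st
      else st)
    ([], 0)).1

-- ===== PORT B =====
def extract_longest_words_containing_alt (char : String) (words : List String) : List String :=
  let c := PySem.Str.lower char
  let candidates := words.filter (fun w => PySem.Str.isIn c w)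
  if candidates.isEmpty then []
  else
    let m := (PySem.List.max? (candidates.map (fun w => PySem.Str.len w)) (fun x => x)).getD 0
    candidates.filter (fun w => PySem.Str.len w = m)

-- ===== PRECONDITION & SPEC =====
def Spec_extract_longest_words_containing (char : String) (words : List String) (out : List String) : Prop := out = extract_longest_words_containing_alt char words
instance (char : String) (words : List String) (out : List String) : Decidable (Spec_extract_longest_words_containing char words out) := by unfold Spec_extract_longest_words_containing; infer_instance

-- ===== CLAIM (what is proved, stated in full; the proofs are below) =====
def Claim_equal_extract_longest_words_containing : Prop := ∀ (char : String) (words : List String), Dom_extract_longest_words_containing char words → Spec_extract_longest_words_containing char words (extract_longest_words_containing char words)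

-- ===== LEMMAS AND PROOFS =====

-- the inner body of A's loop (applied to candidate words only)
def pvStep (st : List String × Int) (word : String) : List String × Int :=
  let word_lenght : Int := PySem.Str.len word
  if word_lenght > st.2 then ([word], word_lenght)
  else if word_lenght = st.2 then (st.1 ++ [word], st.2)
  else st

-- A's loop leaves the state unchanged on words not containing c: fold over words = fold over the filtered list.
theorem pv_foldl_filter {α β : Type} (p : α → Bool) (g : β → α → β)
    (xs : List α) (st : β) :
    xs.foldl (fun st x => if p x then g st x else st) st
      = (xs.filter p).foldl g st := by
  induction xs generalizing st with
  | nil => rfl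
  | cons x t ih =>
    by_cases h : p x <;> simp [h, ih]

-- invariant of A's fused loop over the candidate list
theorem pv_loop_char (cs : List String) (res : List String) (m : Int) :
    (cs.foldl pvStep (res, m)).1
      = (if cs.foldl (fun a w => max a (w.length : Int)) m = m then res else [])
        ++ cs.filter (fun w => (w.length : Int) = cs.foldl (fun a w => max a (w.length : Int)) m) := by
  induction cs generalizing res m with
  | nil => simp
  | cons w t ih =>
    simp only [List.foldl_cons, List.filter_cons, pvStep, PySem.Str.len_eq, String.length_toList]
    have hge := (PySem.List.le_foldl_max_int t (fun w => (w.length : Int)) (max m (w.length : Int))).1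
    by_cases h1 : (w.length : Int) > m
    · have hmax : max m (w.length : Int) = (w.length : Int) := by omega
      rw [hmax] at hge; simp only [hmax]
      rw [if_pos h1, ih]
      have hFne : ¬ (t.foldl (fun a w => max a (w.length : Int)) (w.length : Int) = m) := by omega
      by_cases h2 : t.foldl (fun a w => max a (w.length : Int)) (w.length : Int) = (w.length : Int)
      · simp [h2]
        intro h; omega
      · have h2' : ¬ ((w.length : Int) = t.foldl (fun a w => max a (w.length : Int)) (w.length : Int)) :=
          fun h => h2 h.symm
        simp [h2', hFne]
        exact h2
    · by_cases h2 : (w.length : Int) = m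
      · have hmax : max m (w.length : Int) = m := by omega
        rw [hmax] at hge; simp only [hmax]
        rw [if_neg h1, if_pos h2, ih]
        by_cases h3 : t.foldl (fun a w => max a (w.length : Int)) m = m
        · simp [h3, h2]
        · have h2' : ¬ ((w.length : Int) = t.foldl (fun a w => max a (w.length : Int)) m) := by omega
          simp [h3, h2']
      · have hmax : max m (w.length : Int) = m := by omega
        rw [hmax] at hge; simp only [hmax]
        rw [if_neg h1, if_neg h2, ih]
        have h2' : ¬ ((w.length : Int) = t.foldl (fun a w => max a (w.length : Int)) m) := by omega
        simp [h2']

-- Python's max() over the candidates' (nonnegative) lengths is A's running max started at 0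
theorem pv_max_eq (c : String) (t : List String) :
    (PySem.List.max? ((c :: t).map (fun w => (w.length : Int))) (fun x => x)).getD 0
      = (c :: t).foldl (fun a w => max a (w.length : Int)) 0 := by
  simp only [List.map_cons, PySem.List.max?_id_cons, Option.getD_some, List.foldl_cons,
    List.foldl_map]
  rw [show max (0 : Int) (c.length : Int) = (c.length : Int) from by
    have : (0 : Int) ≤ (c.length : Int) := by positivity
    omega]

-- ===== VERDICT (by name: the statement is the Claim_ definition above) =====
theorem extract_longest_words_containing_spec : Claim_equal_extract_longest_words_containing := by
  intro char words _
  show extract_longest_words_containing char words = extract_longest_words_containing_alt char words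
  unfold extract_longest_words_containing extract_longest_words_containing_alt
  show (words.foldl
      (fun (st : List String × Int) word =>
        if PySem.Str.isIn (PySem.Str.lower char) word then pvStep st word else st)
      ([], 0)).1 = _
  rw [pv_foldl_filter (fun w => PySem.Str.isIn (PySem.Str.lower char) w) pvStep words ([], 0)]
  simp only [PySem.Str.len_eq, String.length_toList]
  cases hcs : words.filter (fun w => PySem.Str.isIn (PySem.Str.lower char) w) with
  | nil => simp
  | cons c t =>
    rw [pv_loop_char, pv_max_eq]
    by_cases h : (c :: t).foldl (fun a w => max a (w.length : Int)) 0 = 0 <;> simp [h]
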